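-- pv_equiv track=rewrite | github.com/asebn1/Programmers_AlgorithmStudy | 모의고사.py | solution
-- ===== SOURCE A (Python) =====
-- def solution(answers):
--     answer = []
--     temp = []
--     a1 = [1,2,3,4,5]
--     count1 = 0
--     a2 = [2,1,2,3,2,4,2,5]
--     count2 = 0
--     a3 = [3,3,1,1,2,2,4,4,5,5]
--     count3 = 0
--     for i in range(0, len(answers), 1):
--         if a1[i%5] == answers[i]:
--             count1 += 1
--     for i in range(0, len(answers), 1):
--         if a2[i%8] == answers[i]:
--             count2 += 1
--     for i in range(0, len(answers), 1):
--         if a3[i%10] == answers[i]: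
--             count3 += 1
--
--     temp.append(count1)
--     temp.append(count2)
--     temp.append(count3)
--     temp1 = temp[:]
--     temp.sort()
--     max = temp[2]
--     for i in range(0, 3, 1):
--         if max == temp1[i]:
--             answer.append(i+1)
--
--
--     return answer
-- ===== SOURCE B (Python) =====
-- def solution(answers):
--     def score(pattern):
--         pat = list(pattern)
--         total = 0
--         for x in answers:
--             if x == pat[0]:
--                 total += 1
--             pat.append(pat.pop(0))
--         return total
--
--     counts = [score(p) for p in ([1, 2, 3, 4, 5],
--                                  [2, 1, 2, 3, 2, 4, 2, 5],
--                                  [3, 3, 1, 1, 2, 2, 4, 4, 5, 5])]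
--     best = max(counts)
--     return [k + 1 for k, c in enumerate(counts) if c == best]
-- ===== Notes on version B (the rewrite author's own statement) =====
-- stated objective: alternative
-- what changed: B scores each pattern with a shared helper that walks the answers against a rotating queue (compare the front, move it to the back), eliminating A's modular index arithmetic, and picks winners with max() plus a comprehension instead of A's copy-sort-then-scan.
import Mathlib
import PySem

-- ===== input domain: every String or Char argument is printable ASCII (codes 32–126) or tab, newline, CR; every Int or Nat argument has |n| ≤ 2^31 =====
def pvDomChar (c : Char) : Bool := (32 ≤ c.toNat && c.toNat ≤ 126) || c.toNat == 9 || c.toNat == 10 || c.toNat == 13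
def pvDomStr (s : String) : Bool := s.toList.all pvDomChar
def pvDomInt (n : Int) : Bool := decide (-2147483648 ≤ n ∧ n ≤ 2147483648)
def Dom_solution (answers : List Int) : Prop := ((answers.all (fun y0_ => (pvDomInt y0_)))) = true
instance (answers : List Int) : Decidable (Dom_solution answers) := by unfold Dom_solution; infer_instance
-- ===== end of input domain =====

-- B scores each pattern by walking the answers against a rotating queue (compare the front, move
-- it to the back) via one shared helper — no modular index arithmetic — and picks the winners
-- with max plus a comprehension instead of A's copy-sort-then-scan; same O(n) cost, different shape.

-- ===== PORT A =====
def solution (answers : List Int) : List Int :=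
  let a1 : List Int := [1, 2, 3, 4, 5]
  let a2 : List Int := [2, 1, 2, 3, 2, 4, 2, 5]
  let a3 : List Int := [3, 3, 1, 1, 2, 2, 4, 4, 5, 5]
  -- each 'for i in range(0, len(answers), 1)' as a foldl over the same range; all indices in range
  let count1 : Int := (PySem.List.pyRange 0 (PySem.List.len answers) 1).foldl
      (fun c i => if PySem.List.pyGetD a1 (PySem.Int.mod i 5) 0 = PySem.List.pyGetD answers i 0 then c + 1 else c) 0
  let count2 : Int := (PySem.List.pyRange 0 (PySem.List.len answers) 1).foldl
      (fun c i => if PySem.List.pyGetD a2 (PySem.Int.mod i 8) 0 = PySem.List.pyGetD answers i 0 then c + 1 else c) 0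
  let count3 : Int := (PySem.List.pyRange 0 (PySem.List.len answers) 1).foldl
      (fun c i => if PySem.List.pyGetD a3 (PySem.Int.mod i 10) 0 = PySem.List.pyGetD answers i 0 then c + 1 else c) 0
  let temp : List Int := [count1, count2, count3]   -- three appends to []
  let temp1 := temp                                  -- temp[:] copy
  let sortedTemp := PySem.List.sorted temp (fun x => x) false   -- temp.sort()
  let mx := PySem.List.pyGetD sortedTemp 2 0         -- temp[2]; length is 3, always in range
  (PySem.List.pyRange 0 3 1).foldl
    (fun acc i => if mx = PySem.List.pyGetD temp1 i 0 then acc ++ [i + 1] else acc) []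

-- ===== PORT B =====
-- Source B's loop body: compare x against pat[0], then pat.append(pat.pop(0))
def pvStep (st : Int × List Int) (x : Int) : Int × List Int :=
  let total := if x = PySem.List.pyGetD st.2 0 0 then st.1 + 1 else st.1
  match PySem.List.pop? st.2 0 with              -- pat.pop(0); pattern never empty, so never none
  | some (v, rest) => (total, rest ++ [v])
  | none => (total, st.2)

-- Source B's helper 'score': walk the answers with the rotating queue
def pvScore (answers : List Int) (pattern : List Int) : Int :=
  (answers.foldl pvStep (0, pattern)).1

def solution_alt (answers : List Int) : List Int :=
  let counts : List Int :=
    [pvScore answers [1, 2, 3, 4, 5],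
     pvScore answers [2, 1, 2, 3, 2, 4, 2, 5],
     pvScore answers [3, 3, 1, 1, 2, 2, 4, 4, 5, 5]]
  let best := PySem.List.maxD counts (fun x => x) 0   -- max(counts)
  (PySem.List.enumerate counts).filterMap
    (fun kc => if kc.2 = best then some (kc.1 + 1) else none)

-- ===== PRECONDITION & SPEC =====
def Spec_solution (answers : List Int) (out : List Int) : Prop := out = solution_alt answers
instance (answers : List Int) (out : List Int) : Decidable (Spec_solution answers out) := by unfold Spec_solution; infer_instance

-- ===== CLAIM (what is proved, stated in full; the proofs are below) =====
def Claim_equal_solution : Prop := ∀ (answers : List Int), Dom_solution answers → Spec_solution answers (solution answers)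

-- ===== LEMMAS AND PROOFS =====

-- common characterisation of a pattern's score: indexed count with a running offset
def pvCnt (pat : List Int) : List Int → Nat → Int
  | [], _ => 0
  | x :: t, k => (if pat.getD (k % pat.length) 0 = x then 1 else 0) + pvCnt pat t (k + 1)

-- A-side: the fold over enumerate pairs computes pvCnt
theorem pvEnumCnt (pat : List Int) (m : Nat) (hm : pat.length = m) :
    ∀ (xs : List Int) (s : Nat) (acc : Int),
      (PySem.List.enumerate xs (s : Int)).foldl
          (fun c ix => if PySem.List.pyGetD pat (PySem.Int.mod ix.1 (m : Int)) 0 = ix.2 then c + 1 else c) acc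
        = acc + pvCnt pat xs s := by
  intro xs
  induction xs with
  | nil => intro s acc; simp [PySem.List.enumerate_nil, pvCnt]
  | cons x t ih =>
    intro s acc
    rw [PySem.List.enumerate_cons, List.foldl_cons]
    have hmod : PySem.Int.mod (s : Int) (m : Int) = ((s % m : Nat) : Int) := PySem.Int.mod_natCast s m
    have hget : PySem.List.pyGetD pat ((s % m : Nat) : Int) 0 = pat.getD (s % m) 0 :=
      PySem.List.pyGetD_natCast pat (s % m) 0
    have hs1 : (s : Int) + 1 = ((s + 1 : Nat) : Int) := by push_cast; ring
    rw [hmod, hget, hs1, ih (s + 1)]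
    simp only [pvCnt, hm]
    split_ifs <;> omega

-- B-side: the rotating-queue walk computes pvCnt
theorem pvRotCnt (pat : List Int) (hpat : pat ≠ []) :
    ∀ (xs : List Int) (k : Nat) (acc : Int),
      (xs.foldl pvStep (acc, pat.rotate k)).1 = acc + pvCnt pat xs k := by
  intro xs
  induction xs with
  | nil => intro k acc; simp [pvCnt]
  | cons x t ih =>
    intro k acc
    have hlen : 0 < pat.length := List.length_pos_iff.mpr hpat
    obtain ⟨a, l, hE⟩ : ∃ a l, pat.rotate k = a :: l := by
      cases hR : pat.rotate k with
      | nil => exact absurd (by simpa using congrArg List.length hR) (by omega)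
      | cons a l => exact ⟨a, l, rfl⟩
    have hkl : k % pat.length < pat.length := Nat.mod_lt _ hlen
    have ha : a = pat.getD (k % pat.length) 0 := by
      have h0 := List.getElem_rotate pat k 0 (by simp [hE])
      simp only [hE, List.getElem_cons_zero, Nat.zero_add] at h0
      rw [List.getD_eq_getElem?_getD, List.getElem?_eq_getElem hkl]
      exact h0
    have hrot : l ++ [a] = pat.rotate (k + 1) := by
      have : (pat.rotate k).rotate 1 = pat.rotate (k + 1) := List.rotate_rotate pat k 1
      rw [hE] at this
      simpa using this
    have hstep : pvStep (acc, a :: l) x = ((if x = a then acc + 1 else acc), pat.rotate (k + 1)) := by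
      simp [pvStep, PySem.List.pop?_zero_cons, PySem.List.pyGetD_ofNat', hrot]
    rw [List.foldl_cons, hE, hstep, ih (k + 1)]
    have hg : pat[k % pat.length]?.getD 0 = a := by
      rw [← List.getD_eq_getElem?_getD, ← ha]
    rcases eq_or_ne x a with h | h
    · simp [pvCnt, h, hg]; omega
    · simp [pvCnt, hg, Ne.symm h, h]

-- A's count loop for a pattern computes pvCnt
theorem pvACount (pat : List Int) (m : Nat) (hm : pat.length = m)
    (mi : Int) (hmi : mi = (m : Int)) (answers : List Int) :
    (PySem.List.pyRange 0 (PySem.List.len answers) 1).foldl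
        (fun c i => if PySem.List.pyGetD pat (PySem.Int.mod i mi) 0 = PySem.List.pyGetD answers i 0 then c + 1 else c) 0
      = pvCnt pat answers 0 := by
  subst hmi
  have h := pvEnumCnt pat m hm answers 0 0
  simp only [Nat.cast_zero] at h
  rw [PySem.List.enumerate_eq_map_pyRange (d := 0), List.foldl_map] at h
  simpa using h

-- B's rotating-queue score computes pvCnt
theorem pvBCount (pat : List Int) (hpat : pat ≠ []) (answers : List Int) :
    pvScore answers pat = pvCnt pat answers 0 := by
  have h := pvRotCnt pat hpat answers 0 0
  simpa [pvScore, List.rotate_zero] using h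

-- max(counts) of a 3-list
theorem pvMaxD3 (a b c : Int) :
    PySem.List.maxD [a, b, c] (fun x => x) 0 = max a (max b c) := by
  simp only [PySem.List.maxD, PySem.List.max?, List.foldl_cons, List.foldl_nil]
  rcases lt_or_ge a b with h1 | h1
  · rw [if_pos h1]
    dsimp only
    split_ifs with h2 <;> simp [max_def] <;> omega
  · rw [if_neg (not_lt.mpr h1)]
    dsimp only
    split_ifs with h2 <;> simp [max_def] <;> omega

-- the third element of the sorted 3-list is the maximum
theorem pvSorted3Max (a b c : Int) :
    PySem.List.pyGetD (PySem.List.sorted [a, b, c] (fun x => x) false) 2 0 = max a (max b c) := by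
  have hlen : (PySem.List.sorted [a, b, c] (fun x : Int => x) false).length = 3 := by
    simp [PySem.List.length_sorted]
  have hpw := PySem.List.sorted_pairwise (xs := [a, b, c]) (key := fun x : Int => x)
  have hmem : ∀ v : Int, v ∈ PySem.List.sorted [a, b, c] (fun x : Int => x) false ↔ v ∈ [a, b, c] :=
    fun v => PySem.List.mem_sorted [a, b, c] (fun x : Int => x) false v
  rcases hE : PySem.List.sorted [a, b, c] (fun x : Int => x) false with _ | ⟨x, _ | ⟨y, _ | ⟨z, rest⟩⟩⟩ <;>
    rw [hE] at hlen <;> simp at hlen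
  obtain rfl : rest = [] := by cases rest <;> simp_all
  rw [hE] at hpw
  simp [List.pairwise_cons] at hpw
  obtain ⟨⟨hxy, hxz⟩, hyz⟩ := hpw
  have ha : a ≤ z := by have := (hmem a).2 (by simp); rw [hE] at this; simp at this; rcases this with rfl | rfl | rfl <;> omega
  have hb : b ≤ z := by have := (hmem b).2 (by simp); rw [hE] at this; simp at this; rcases this with rfl | rfl | rfl <;> omega
  have hc : c ≤ z := by have := (hmem c).2 (by simp); rw [hE] at this; simp at this; rcases this with rfl | rfl | rfl <;> omega
  have hz : z ∈ [a, b, c] := by rw [← hmem z, hE]; simp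
  have h1 : z = max a (max b c) := by
    apply le_antisymm
    · simp at hz; rcases hz with rfl | rfl | rfl
      · exact le_max_left _ _
      · exact le_trans (le_max_left _ _) (le_max_right _ _)
      · exact le_trans (le_max_right _ _) (le_max_right _ _)
    · exact max_le ha (max_le hb hc)
  simpa [PySem.List.pyGetD_natCast] using h1

-- both final selection passes produce the same list, for any threshold m
theorem pvSelEq (m c1 c2 c3 : Int) :
    (PySem.List.pyRange 0 3 1).foldl
        (fun acc i => if m = PySem.List.pyGetD [c1, c2, c3] i 0 then acc ++ [i + 1] else acc) []
      = (PySem.List.enumerate [c1, c2, c3]).filterMap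
          (fun kc => if kc.2 = m then some (kc.1 + 1) else none) := by
  have hr : PySem.List.pyRange 0 3 1 = [0, 1, 2] := by decide
  rw [hr]
  simp only [PySem.List.enumerate_cons, PySem.List.enumerate_nil, List.foldl, List.filterMap]
  have hcomm : ∀ u : Int, (u = m) = (m = u) := fun u => propext eq_comm
  simp only [hcomm]
  norm_num [PySem.List.pyGetD]
  clear hcomm hr
  by_cases h1 : m = c1 <;> by_cases h2 : m = c2 <;> by_cases h3 : m = c3 <;>
    simp_all

-- ===== VERDICT (by name: the statement is the Claim_ definition above) =====
theorem solution_spec : Claim_equal_solution := by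
  intro answers _
  show solution answers = solution_alt answers
  dsimp only [solution, solution_alt]
  have hA1 := pvACount [1, 2, 3, 4, 5] 5 rfl 5 (by norm_num) answers
  have hA2 := pvACount [2, 1, 2, 3, 2, 4, 2, 5] 8 rfl 8 (by norm_num) answers
  have hA3 := pvACount [3, 3, 1, 1, 2, 2, 4, 4, 5, 5] 10 rfl 10 (by norm_num) answers
  rw [hA1, hA2, hA3,
      pvBCount [1, 2, 3, 4, 5] (by simp) answers,
      pvBCount [2, 1, 2, 3, 2, 4, 2, 5] (by simp) answers,
      pvBCount [3, 3, 1, 1, 2, 2, 4, 4, 5, 5] (by simp) answers,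
      pvSorted3Max, pvMaxD3, pvSelEq]
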